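-- pv_equiv track=rewrite | github.com/loning/mbook-binary | src/binaryuniverse/tests/test_P3_1.py | encode_states
-- ===== SOURCE A (Python) =====
-- import math
-- from typing import Set, Any, Dict, List, Tuple, Callable
--
-- def encode_states(states: Set[Any]) -> str:
--     """编码状态集合为二进制字符串"""
--     if not states:
--         return "0"
--
--     # 将状态转换为可比较的格式并排序
--     sorted_states = sorted([str(state) for state in states])
--
--     # 为每个状态分配唯一的二进制ID
--     binary_encoding = ""
--     for i, state in enumerate(sorted_states):
--         state_id = format(i, f'0{math.ceil(math.log2(len(sorted_states)))}b') if len(sorted_states) > 1 else "0"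
--         # 添加状态标识符和分隔符
--         binary_encoding += "1" + state_id + "0"  # 1开始，0结束
--
--     return binary_encoding
-- ===== SOURCE B (Python) =====
-- def encode_states(states):
--     n = len(states)
--     if n == 0:
--         return "0"
--     if n == 1:
--         return "100"
--     # Prefix-doubling: build the whole table of fixed-width codes by repeated
--     # doubling ('0'+code then '1'+code), instead of formatting each index.
--     codes = [""]
--     for _ in range((n - 1).bit_length()):
--         codes = ["0" + c for c in codes] + ["1" + c for c in codes]
--     return "".join("1" + c + "0" for c in codes[:n])
-- ===== Notes on version B (the rewrite author's own statement) =====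
-- stated objective: faster
-- what changed: The output depends only on the number of states, so B drops the sort and the per-index str/format/log calls and instead generates the whole fixed-width code table by prefix-doubling ('0'+c / '1'+c over a growing list), truncates it to n and joins the wrapped codes.
import Mathlib
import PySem

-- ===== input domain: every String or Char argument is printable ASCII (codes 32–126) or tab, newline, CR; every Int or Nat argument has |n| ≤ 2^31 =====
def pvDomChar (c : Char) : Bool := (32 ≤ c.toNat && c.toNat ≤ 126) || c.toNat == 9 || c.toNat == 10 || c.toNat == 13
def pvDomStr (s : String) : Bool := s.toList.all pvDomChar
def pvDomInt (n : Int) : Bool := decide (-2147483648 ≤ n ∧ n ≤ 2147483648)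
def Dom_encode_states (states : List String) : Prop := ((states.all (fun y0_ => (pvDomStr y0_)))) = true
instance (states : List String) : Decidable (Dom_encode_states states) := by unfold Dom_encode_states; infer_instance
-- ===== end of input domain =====

-- B generates the fixed-width code table by prefix-doubling ('0'+c / '1'+c) instead of
-- sorting and formatting each index (the output depends only on the number of states).

-- format(i, f'0{w}b'): binary digits of i zero-padded on the left to width w, msb first.
-- Exact model for 0 ≤ i < 2^w — the only case A reaches, since i < n ≤ 2^ceil(log2 n) = 2^w.
def binDigits : Nat → Nat → List Char
  | 0, _ => []
  | w + 1, i => binDigits w (i / 2) ++ [if i % 2 = 1 then '1' else '0']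

-- ===== PORT A =====
-- sorted([str(state) for state in states]); str on a str is the identity.
def sortedStatesA (states : List String) : List String :=
  PySem.List.sorted (states.map (fun state => state)) (fun s => s)

-- math.ceil(math.log2 n) for 1 ≤ n ≤ 2^31 is Nat.clog 2 n (exact: the float log2 of such an
-- int cannot cross an integer boundary, powers of two being exact binary floats).
def encode_states (states : List String) : String :=
  if states = [] then "0"
  else
    -- for i, state in enumerate(sorted_states): binary_encoding += "1" + state_id + "0"
    (PySem.List.enumerate (sortedStatesA states)).foldl
      (fun binary_encoding p =>
        binary_encoding ++ "1" ++
          (if (sortedStatesA states).length > 1 then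
            String.ofList (binDigits (Nat.clog 2 (sortedStatesA states).length) p.1.toNat)
          else "0") ++ "0")
      ""

-- ===== PORT B =====
-- (n-1).bit_length()
def pyBitLength (m : Nat) : Nat := if m = 0 then 0 else Nat.log2 m + 1

-- codes = ["0" + c for c in codes] + ["1" + c for c in codes]
def codesStep (codes : List String) : List String :=
  codes.map (fun c => "0" ++ c) ++ codes.map (fun c => "1" ++ c)

def encode_states_alt (states : List String) : String :=
  if states.length = 0 then "0"
  else if states.length = 1 then "100"
  else
    let codes := (List.range (pyBitLength (states.length - 1))).foldl
      (fun cs _ => codesStep cs) [""]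
    String.join ((codes.take states.length).map (fun c => "1" ++ c ++ "0"))

-- ===== PRECONDITION & SPEC =====
def Spec_encode_states (states : List String) (out : String) : Prop := out = encode_states_alt states
instance (states : List String) (out : String) : Decidable (Spec_encode_states states out) := by unfold Spec_encode_states; infer_instance

-- ===== CLAIM (what is proved, stated in full; the proofs are below) =====
def Claim_equal_encode_states : Prop := ∀ (states : List String), Dom_encode_states states → Spec_encode_states states (encode_states states)

-- ===== LEMMAS AND PROOFS =====

theorem foldl_append_shift (l : List String) (acc : String) :
    List.foldl (fun r s => r ++ s) acc l = acc ++ List.foldl (fun r s => r ++ s) "" l := by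
  induction l generalizing acc with
  | nil => simp
  | cons x xs ih =>
    simp only [List.foldl_cons]
    rw [ih, ih ("" ++ x)]
    simp [String.append_assoc]

theorem join_cons (a : String) (l : List String) :
    String.join (a :: l) = a ++ String.join l := by
  simp only [String.join, List.foldl_cons]
  rw [foldl_append_shift]
  simp

-- A's loop body ignores the list elements: the fold over enumerate is a join over the indices.
theorem foldl_enumerate_ignore {α : Type} (g : Int → String) :
    ∀ (l : List α) (s : Int) (acc : String),
      (PySem.List.enumerate l s).foldl (fun b p => b ++ g p.1) acc
        = acc ++ String.join ((List.range l.length).map (fun k : Nat => g (s + (k : Int)))) := by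
  intro l
  induction l with
  | nil => intro s acc; simp [PySem.List.enumerate_nil, String.join]
  | cons x xs ih =>
    intro s acc
    rw [PySem.List.enumerate_cons, List.foldl_cons, ih (s + 1)]
    have hr : (List.range (x :: xs).length).map (fun k : Nat => g (s + (k : Int)))
        = g s :: (List.range xs.length).map (fun k : Nat => g ((s + 1) + (k : Int))) := by
      rw [List.length_cons, List.range_succ_eq_map, List.map_cons, List.map_map]
      refine congrArg₂ _ (by simp) ?_
      apply List.map_congr_left
      intro k _
      show g (s + ((k + 1 : Nat) : Int)) = g (s + 1 + (k : Int))
      push_cast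
      ring_nf
    rw [hr, join_cons, ← String.append_assoc]

theorem clog2_eq_bitlen (n : Nat) (hn : 2 ≤ n) :
    Nat.clog 2 n = pyBitLength (n - 1) := by
  have hm : n - 1 ≠ 0 := by omega
  rw [pyBitLength, if_neg hm, Nat.log2_eq_log_two]
  apply le_antisymm
  · rw [Nat.clog_le_iff_le_pow (by norm_num)]
    have := Nat.lt_pow_succ_log_self (b := 2) (by norm_num) (n - 1)
    omega
  · have h2 : 2 ^ Nat.log 2 (n - 1) ≤ n - 1 := Nat.pow_log_le_self 2 hm
    have hlt : 2 ^ Nat.log 2 (n - 1) < n := by omega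
    have := (Nat.lt_clog_iff_pow_lt (by norm_num : 1 < 2)).2 hlt
    omega

theorem length_sortedStatesA (states : List String) :
    (sortedStatesA states).length = states.length := by
  rw [sortedStatesA, PySem.List.length_sorted, List.length_map]

theorem ofList_cons (c : Char) (l : List Char) :
    String.ofList (c :: l) = String.ofList [c] ++ String.ofList l := by
  apply String.toList_injective
  simp

-- the '0'-branch of the doubling step appends a leading zero bit
theorem binDigits_succ_low (w i : Nat) (hi : i < 2 ^ w) :
    binDigits (w + 1) i = '0' :: binDigits w i := by
  induction w generalizing i with
  | zero =>
    interval_cases i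
    rfl
  | succ w ih =>
    have h2 : i / 2 < 2 ^ w := by omega
    show binDigits (w + 1) (i / 2) ++ _ = _
    rw [ih _ h2]
    rfl

-- the '1'-branch of the doubling step appends a leading one bit
theorem binDigits_succ_high (w i : Nat) (hi : i < 2 ^ w) :
    binDigits (w + 1) (2 ^ w + i) = '1' :: binDigits w i := by
  induction w generalizing i with
  | zero =>
    interval_cases i
    rfl
  | succ w ih =>
    have hdiv : (2 ^ (w + 1) + i) / 2 = 2 ^ w + i / 2 := by
      rw [pow_succ]; omega
    have hmod : (2 ^ (w + 1) + i) % 2 = i % 2 := by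
      rw [pow_succ]; omega
    have h2 : i / 2 < 2 ^ w := by omega
    show binDigits (w + 1) ((2 ^ (w + 1) + i) / 2) ++ _ = _
    rw [hdiv, ih _ h2, hmod]
    rfl

-- the doubling loop builds exactly the table of width-w codes in index order
theorem codes_eq (w : Nat) :
    (List.range w).foldl (fun cs _ => codesStep cs) [""]
      = (List.range (2 ^ w)).map (fun i => String.ofList (binDigits w i)) := by
  induction w with
  | zero => rfl
  | succ w ih =>
    rw [List.range_succ, List.foldl_append, ih]
    show codesStep _ = _
    rw [codesStep, List.map_map, List.map_map]
    have hsplit : List.range (2 ^ (w + 1)) = List.range (2 ^ w) ++ (List.range (2 ^ w)).map (2 ^ w + ·) := by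
      rw [pow_succ, Nat.mul_two, List.range_add]
    rw [hsplit, List.map_append, List.map_map]
    congr 1
    · apply List.map_congr_left
      intro i hi
      rw [List.mem_range] at hi
      show "0" ++ String.ofList (binDigits w i) = String.ofList (binDigits (w + 1) i)
      rw [binDigits_succ_low w i hi, ofList_cons]
    · apply List.map_congr_left
      intro i hi
      rw [List.mem_range] at hi
      show "1" ++ String.ofList (binDigits w i) = String.ofList (binDigits (w + 1) (2 ^ w + i))
      rw [binDigits_succ_high w i hi, ofList_cons]

-- ===== VERDICT (by name: the statement is the Claim_ definition above) =====
theorem encode_states_spec : Claim_equal_encode_states := by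
  intro states _
  unfold Spec_encode_states encode_states encode_states_alt
  by_cases h0 : states = []
  · subst h0; simp
  · have hn : states.length ≠ 0 := by simpa [List.length_eq_zero_iff] using h0
    rw [if_neg h0, if_neg hn]
    by_cases h1 : states.length = 1
    · rw [if_pos h1]
      obtain ⟨x, hx⟩ := List.length_eq_one_iff.mp ((length_sortedStatesA states).trans h1)
      rw [hx]
      simp only [PySem.List.enumerate_cons, PySem.List.enumerate_nil, List.foldl_cons,
        List.foldl_nil, List.length_cons, List.length_nil]
      norm_num
      decide
    · have h2 : 2 ≤ states.length := by omega
      rw [if_neg h1]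
      simp only [String.append_assoc]
      rw [foldl_enumerate_ignore
        (fun i => "1" ++ ((if (sortedStatesA states).length > 1 then
            String.ofList (binDigits (Nat.clog 2 (sortedStatesA states).length) i.toNat)
          else "0") ++ "0"))]
      rw [codes_eq]
      have hle : states.length ≤ 2 ^ pyBitLength (states.length - 1) := by
        have h := Nat.lt_log2_self (n := states.length - 1)
        rw [pyBitLength, if_neg (by omega : states.length - 1 ≠ 0)]
        omega
      rw [← List.map_take, List.take_range, Nat.min_eq_left hle]
      rw [length_sortedStatesA]
      have hgt : states.length > 1 := by omega
      simp only [if_pos hgt, clog2_eq_bitlen _ h2]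
      have he : ∀ s : String, "" ++ s = s := fun s => by simp
      rw [he]
      rw [List.map_map]
      congr 1
      apply List.map_congr_left
      intro k _
      simp
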